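-- pv_equiv track=rewrite | github.com/l0dom/rifm_gener | gen.py | __gen_bigrams
-- ===== SOURCE A (Python) =====
-- def __gen_bigrams(tokens):
--     t0 = '$'
--     for t1 in tokens:
--         yield t0, t1
--         if t1 in'.!?':
--             yield t1, '$'
--             t0 = '$'
--         else:
--             t0 = t1
-- ===== SOURCE B (Python) =====
-- def __gen_bigrams(tokens):
--     def augment():
--         yield '$'
--         for t in tokens:
--             yield t
--             if t in '.!?':
--                 yield '$'
--     it = augment()
--     prev = next(it)
--     for cur in it:
--         yield prev, cur
--         prev = cur
-- ===== Notes on version B (the rewrite author's own statement) =====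
-- stated objective: alternative
-- what changed: B separates concerns: an inner lazy generator inserts the '$' sentence boundaries into the token stream, and the outer loop forms bigrams by pairwise consumption, instead of threading the previous-token state through conditional yields.
import Mathlib
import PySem

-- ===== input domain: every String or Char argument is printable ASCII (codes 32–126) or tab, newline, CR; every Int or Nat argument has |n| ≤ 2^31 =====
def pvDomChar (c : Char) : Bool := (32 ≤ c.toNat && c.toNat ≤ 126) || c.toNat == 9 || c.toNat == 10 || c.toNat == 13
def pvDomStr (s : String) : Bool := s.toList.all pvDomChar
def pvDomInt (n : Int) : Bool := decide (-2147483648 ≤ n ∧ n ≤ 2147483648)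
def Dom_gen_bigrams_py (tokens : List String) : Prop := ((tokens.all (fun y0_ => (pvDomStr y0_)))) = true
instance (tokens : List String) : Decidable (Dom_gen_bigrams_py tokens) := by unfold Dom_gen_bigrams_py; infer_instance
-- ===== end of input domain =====

-- B splits the task: an inner augmenter inserts '$' sentence boundaries into the token
-- stream, and the outer step forms bigrams pairwise; A instead threads a prev-token state
-- through conditional yields. Return values proved equal on all inputs.


-- ===== PORT A =====
-- the generator loop with its t0 state, step for step
def genBigramsLoop (t0 : String) : List String → List (String × String)
  | [] => []
  | t1 :: rest =>
      (t0, t1) ::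
        (if PySem.Str.isIn t1 ".!?" then
          (t1, "$") :: genBigramsLoop "$" rest
        else
          genBigramsLoop t1 rest)

def gen_bigrams_py (tokens : List String) : List (String × String) :=
  genBigramsLoop "$" tokens

-- ===== PORT B =====
-- augment(): '$', then each token, plus an extra '$' after a terminator
def augmentBody (tokens : List String) : List String :=
  tokens.flatMap (fun t => if PySem.Str.isIn t ".!?" then [t, "$"] else [t])

def augmentTokens (tokens : List String) : List String :=
  "$" :: augmentBody tokens

def gen_bigrams_py_alt (tokens : List String) : List (String × String) :=
  let aug := augmentTokens tokens
  aug.zip aug.tail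

-- ===== PRECONDITION & SPEC =====
def Spec_gen_bigrams_py (tokens : List String) (out : List (String × String)) : Prop := out = gen_bigrams_py_alt tokens
instance (tokens : List String) (out : List (String × String)) : Decidable (Spec_gen_bigrams_py tokens out) := by unfold Spec_gen_bigrams_py; infer_instance

-- ===== CLAIM (what is proved, stated in full; the proofs are below) =====
def Claim_equal_gen_bigrams_py : Prop := ∀ (tokens : List String), Dom_gen_bigrams_py tokens → Spec_gen_bigrams_py tokens (gen_bigrams_py tokens)

-- ===== LEMMAS AND PROOFS =====
-- A's state loop equals pairwise-zipping of the boundary-augmented stream prefixed by t0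
theorem genBigramsLoop_eq_zip (tokens : List String) : ∀ (t0 : String),
    genBigramsLoop t0 tokens =
      (t0 :: augmentBody tokens).zip (augmentBody tokens) := by
  induction tokens with
  | nil => intro t0; simp [genBigramsLoop, augmentBody]
  | cons t rest ih =>
      intro t0
      by_cases h : PySem.Str.isIn t ".!?"
      · simp only [genBigramsLoop, augmentBody, List.flatMap_cons, h, if_true, ih "$"]
        simp [augmentBody]
      · simp only [genBigramsLoop, augmentBody, List.flatMap_cons, h, if_false, ih t]
        simp [augmentBody]

-- ===== VERDICT (by name: the statement is the Claim_ definition above) =====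
theorem gen_bigrams_py_spec : Claim_equal_gen_bigrams_py := by
  intro tokens _
  unfold Spec_gen_bigrams_py gen_bigrams_py gen_bigrams_py_alt
  rw [genBigramsLoop_eq_zip]
  simp [augmentTokens]
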